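-- pv_equiv track=rewrite | github.com/privacyidea/privacyidea | privacyidea/lib/utils/__init__.py | reduce_realms
-- ===== SOURCE A (Python) =====
-- def reduce_realms(all_realms, policies):
--     """
--     This function reduces the realm list based on the policies
--     If there is a policy, that acts for all realms, all realms are returned.
--     Otherwise, only realms are returned, that are contained in the policies.
--     """
--     realms = {}
--     if not policies:
--         # if there are no policies at all, this works for all realms
--         realms = all_realms
--     else:
--         for pol in policies:
--             pol_realm = pol.get("realm")
--             if not pol_realm:
--                 # If there is ANY empty realm, this means the policy acts for
--                 # ALL realms
--                 realms = all_realms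
--                 break
--             else:
--                 for r in pol_realm:
--                     if r not in realms:
--                         # Attach each realm in the policy
--                         realms[r] = all_realms.get(r)
--     return realms
-- ===== SOURCE B (Python) =====
-- def reduce_realms(all_realms, policies):
--     # staged: extract realm lists, all-realms check, ordered dedup of names, one lookup pass
--     realm_lists = [pol.get("realm") for pol in policies]
--     if not policies or not all(realm_lists):
--         return all_realms
--     seen = dict.fromkeys(r for lst in realm_lists for r in lst)
--     return {r: all_realms.get(r) for r in seen}
-- ===== Notes on version B (the rewrite author's own statement) =====
-- stated objective: alternative
-- what changed: B replaces A's single fused loop (break on empty realm, per-element membership guard while building the value dict) by four staged passes: extract the realm lists, an all() check deciding the all-realms cases, an ordered dedup of realm names via dict.fromkeys, and then one flat lookup pass over the distinct names only.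
-- outside the precondition, e.g. on reduce_realms({}, [{'realm': ['r1']}]): A returns {'r1': None}, B returns {'r1': None}
import Mathlib
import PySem

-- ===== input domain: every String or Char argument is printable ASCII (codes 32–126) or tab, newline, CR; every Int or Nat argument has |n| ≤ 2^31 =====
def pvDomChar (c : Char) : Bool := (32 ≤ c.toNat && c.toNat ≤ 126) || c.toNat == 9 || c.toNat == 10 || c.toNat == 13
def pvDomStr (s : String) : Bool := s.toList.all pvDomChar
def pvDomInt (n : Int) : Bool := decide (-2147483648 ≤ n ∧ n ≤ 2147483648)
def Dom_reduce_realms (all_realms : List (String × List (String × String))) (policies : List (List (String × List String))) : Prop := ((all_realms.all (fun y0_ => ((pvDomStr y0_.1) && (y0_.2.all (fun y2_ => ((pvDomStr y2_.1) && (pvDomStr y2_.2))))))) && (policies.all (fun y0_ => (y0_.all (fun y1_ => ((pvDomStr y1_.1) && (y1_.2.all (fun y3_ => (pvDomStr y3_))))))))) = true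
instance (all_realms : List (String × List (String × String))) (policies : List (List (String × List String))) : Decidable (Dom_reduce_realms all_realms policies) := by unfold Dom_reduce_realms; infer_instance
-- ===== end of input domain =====

-- B restages A's fused loop as four passes: realm-list extraction, an all() check for the
-- all-realms cases, ordered dedup of realm names via dict.fromkeys, then one flat lookup
-- pass over the distinct names; an alternative decomposition, same cost.


-- pol.get("realm") with Python falsiness: None and [] are both falsy
def pvPolRealm (pol : List (String × List String)) : List String :=
  ((PySem.Dict.mk pol).get? "realm").getD []

-- all_realms.get(r); Python yields None when r is absent — Pre_ excludes that, so getD [] is exact on Pre_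
def pvRealmVal (all_realms : List (String × List (String × String))) (r : String) : List (String × String) :=
  ((PySem.Dict.mk all_realms).get? r).getD []

-- ===== PORT A =====
def pvALoop (all_realms : List (String × List (String × String)))
    (realms : PySem.Dict String (List (String × String))) :
    List (List (String × List String)) → List (String × List (String × String))
  | [] => realms.items
  | pol :: rest =>
    let pr := pvPolRealm pol
    if pr.isEmpty then all_realms
    else pvALoop all_realms
      (pr.foldl (fun d r => if d.contains r then d else d.insert r (pvRealmVal all_realms r)) realms) rest

def reduce_realms (all_realms : List (String × List (String × String))) (policies : List (List (String × List String))) : List (String × List (String × String)) :=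
  if policies.isEmpty then all_realms
  else pvALoop all_realms PySem.Dict.empty policies

-- ===== PORT B =====
-- Source B: realm_lists pass; 'not policies or not all(realm_lists)'; dict.fromkeys ordered dedup
-- (a Unit-valued dict); one lookup pass (dict comprehension) over the distinct names.
def reduce_realms_alt (all_realms : List (String × List (String × String))) (policies : List (List (String × List String))) : List (String × List (String × String)) :=
  let realmLists := policies.map pvPolRealm
  if policies.isEmpty || realmLists.any (fun l => l.isEmpty) then all_realms
  else
    let seen := (realmLists.flatten.foldl (fun u r => u.insert r ())
                  (PySem.Dict.empty : PySem.Dict String Unit)).keys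
    (seen.foldl (fun d r => d.insert r (pvRealmVal all_realms r))
      (PySem.Dict.empty : PySem.Dict String (List (String × String)))).items

-- ===== PRECONDITION & SPEC =====
-- Pre_ excludes inputs on which Python A stores all_realms.get(r) = None for a realm r absent from
-- all_realms: that dict value is not of the declared type List (String × String). Only the policies
-- actually processed by A (the truthy-realm prefix) are constrained.
def Pre_reduce_realms (all_realms : List (String × List (String × String))) (policies : List (List (String × List String))) : Prop :=
  ∀ pol ∈ policies.takeWhile (fun pol => !(pvPolRealm pol).isEmpty),
    ∀ r ∈ pvPolRealm pol, ((PySem.Dict.mk all_realms).get? r).isSome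
instance (all_realms : List (String × List (String × String))) (policies : List (List (String × List String))) : Decidable (Pre_reduce_realms all_realms policies) := by unfold Pre_reduce_realms; infer_instance

def pvWitness_reduce_realms : (List (String × List (String × String))) × (List (List (String × List String))) :=
  ([("r1", [("x", "y")]), ("r2", [])], [[("realm", ["r1"])], [("realm", ["r1", "r2"])]])

def Spec_reduce_realms (all_realms : List (String × List (String × String))) (policies : List (List (String × List String))) (out : List (String × List (String × String))) : Prop := out = reduce_realms_alt all_realms policies
instance (all_realms : List (String × List (String × String))) (policies : List (List (String × List String))) (out : List (String × List (String × String))) : Decidable (Spec_reduce_realms all_realms policies out) := by unfold Spec_reduce_realms; infer_instance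

-- ===== CLAIM (what is proved, stated in full; the proofs are below) =====
def Claim_equal_reduce_realms : Prop := ∀ (all_realms : List (String × List (String × String))) (policies : List (List (String × List String))), Dom_reduce_realms all_realms policies → Pre_reduce_realms all_realms policies → Spec_reduce_realms all_realms policies (reduce_realms all_realms policies)

-- ===== LEMMAS AND PROOFS =====

-- A's guarded insert fold stays in correspondence with B's Unit-dict (dict.fromkeys) fold:
-- the value dict's items are exactly the Unit dict's keys paired with their canonical values.
lemma pv_guard_fold_corr (v : String → List (String × String)) (L : List String)
    (d : PySem.Dict String (List (String × String))) (u : PySem.Dict String Unit)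
    (h : d.items = u.keys.map (fun r => (r, v r))) :
    (L.foldl (fun d r => if d.contains r then d else d.insert r (v r)) d).items
      = (L.foldl (fun u r => u.insert r ()) u).keys.map (fun r => (r, v r)) := by
  induction L generalizing d u with
  | nil => exact h
  | cons r rest ih =>
    simp only [List.foldl_cons]
    have hkeys : d.keys = u.keys := by
      simp only [PySem.Dict.keys, h, List.map_map]
      simp
    have hcont : d.contains r = u.contains r := by
      rw [PySem.Dict.contains_eq_decide_mem_keys, PySem.Dict.contains_eq_decide_mem_keys, hkeys]
    by_cases hc : u.contains r = true
    · rw [hcont, hc]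
      simp only [if_true]
      exact ih d (u.insert r ()) (by rw [PySem.Dict.keys_insert_of_contains u () hc]; exact h)
    · have hc' : u.contains r = false := by simpa using hc
      rw [hcont, hc']
      simp only [Bool.false_eq_true, if_false]
      refine ih _ _ ?_
      rw [PySem.Dict.items_insert_of_not_contains d (v r) (by rw [hcont]; exact hc'),
          PySem.Dict.keys_insert_of_not_contains u () hc', h, List.map_append, List.map_cons,
          List.map_nil]

-- A's loop equals: all_realms if any realm list is empty, else the Unit-dict keys paired with values.
lemma pv_loop_eq (all_realms : List (String × List (String × String)))
    (policies : List (List (String × List String)))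
    (d : PySem.Dict String (List (String × String))) (u : PySem.Dict String Unit)
    (h : d.items = u.keys.map (fun r => (r, pvRealmVal all_realms r))) :
    pvALoop all_realms d policies
      = if policies.any (fun pol => (pvPolRealm pol).isEmpty) then all_realms
        else (policies.foldl
            (fun u pol => (pvPolRealm pol).foldl (fun u r => u.insert r ()) u) u).keys.map
          (fun r => (r, pvRealmVal all_realms r)) := by
  induction policies generalizing d u with
  | nil => simpa [pvALoop] using h
  | cons pol rest ih =>
    simp only [pvALoop, List.any_cons, List.foldl_cons]
    by_cases he : (pvPolRealm pol).isEmpty = true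
    · simp [he]
    · have hb : (pvPolRealm pol).isEmpty = false := by simpa using he
      rw [if_neg he]
      simp only [hb, Bool.false_or]
      exact ih _ _ (pv_guard_fold_corr _ _ d u h)

-- ===== VERDICT (by name: the statement is the Claim_ definition above) =====
theorem reduce_realms_spec : Claim_equal_reduce_realms := by
  intro all_realms policies _ _
  unfold Spec_reduce_realms reduce_realms reduce_realms_alt
  by_cases hp : policies.isEmpty = true
  · simp [hp]
  · have hb : policies.isEmpty = false := by simpa using hp
    rw [if_neg hp]
    have hcond : (policies.map pvPolRealm).any (fun l => l.isEmpty)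
        = policies.any (fun pol => (pvPolRealm pol).isEmpty) := by
      simp [List.any_map, Function.comp_def]
    simp only [hb, Bool.false_or, hcond]
    rw [pv_loop_eq all_realms policies PySem.Dict.empty PySem.Dict.empty (by
      simp [PySem.Dict.keys_empty, PySem.Dict.empty, PySem.Dict.items])]
    by_cases ha : policies.any (fun pol => (pvPolRealm pol).isEmpty) = true
    · simp [ha]
    · rw [if_neg ha, if_neg ha]
      have hfl : (policies.map pvPolRealm).flatten.foldl (fun u r => u.insert r ())
            (PySem.Dict.empty : PySem.Dict String Unit)
          = policies.foldl (fun u pol => (pvPolRealm pol).foldl (fun u r => u.insert r ()) u)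
            PySem.Dict.empty := by
        rw [List.foldl_flatten, List.foldl_map]
      rw [← hfl]
      have hnd : ((policies.map pvPolRealm).flatten.foldl (fun u r => u.insert r ())
          (PySem.Dict.empty : PySem.Dict String Unit)).keys.Nodup :=
        PySem.Dict.nodup_keys_foldl_insert _ (fun _ _ => ()) _ (by
          simp [PySem.Dict.keys_empty])
      have hfresh := PySem.Dict.items_foldl_insert_fresh
        ((policies.map pvPolRealm).flatten.foldl (fun u r => u.insert r ())
          (PySem.Dict.empty : PySem.Dict String Unit)).keys
        id (fun r => pvRealmVal all_realms r)
        (PySem.Dict.empty : PySem.Dict String (List (String × String)))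
        (fun a _ => by simp) (by simpa using hnd)
      simp only [id_eq] at hfresh
      rw [hfresh]
      simp [PySem.Dict.empty]
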